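-- pv_equiv track=rewrite | github.com/alexandraback/datacollection | solutions_1674486_0/Python/Shurick/A.py | dfs
-- ===== SOURCE A (Python) =====
-- def dfs(G,v,visited):
--     visited[v-1] = True
--     #print ' :: ',v
--     E = G[v]
--     #print E
--     for ve in E:
--         if not visited[ve-1]:
--             a = dfs(G,ve,visited)
--             if a:
--                 return True
--         else:
--             #print 'visited:',ve
--             return True
--     return False
-- ===== SOURCE B (Python) =====
-- def dfs(G, v, visited):
--     visited[v - 1] = True
--     stack = [G[v]]
--     while stack:
--         E = stack[-1]
--         if not E:
--             stack.pop()
--             continue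
--         ve = E[0]
--         stack[-1] = E[1:]
--         if visited[ve - 1]:
--             return True
--         visited[ve - 1] = True
--         stack.append(G[ve])
--     return False
-- ===== Notes on version B (the rewrite author's own statement) =====
-- stated objective: alternative
-- what changed: Recursive DFS replaced by an iterative DFS driving an explicit stack of remaining-neighbor lists, with the same marking order and the same short-circuit return on the first already-visited neighbor.
import Mathlib
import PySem

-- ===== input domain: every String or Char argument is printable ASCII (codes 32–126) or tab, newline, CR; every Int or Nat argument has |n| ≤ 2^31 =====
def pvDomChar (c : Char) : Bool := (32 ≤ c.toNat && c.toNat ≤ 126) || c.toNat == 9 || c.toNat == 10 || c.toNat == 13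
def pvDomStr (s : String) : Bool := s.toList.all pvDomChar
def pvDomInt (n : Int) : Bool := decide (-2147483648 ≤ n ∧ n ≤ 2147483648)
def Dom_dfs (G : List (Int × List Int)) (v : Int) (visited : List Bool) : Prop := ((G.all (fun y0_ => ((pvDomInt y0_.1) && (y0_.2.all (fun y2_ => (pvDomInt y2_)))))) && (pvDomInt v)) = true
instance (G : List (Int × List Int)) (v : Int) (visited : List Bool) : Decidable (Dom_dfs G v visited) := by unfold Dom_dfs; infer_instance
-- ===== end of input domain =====

-- B replaces A's recursion by an iterative DFS over an explicit stack of remaining-neighbor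
-- lists; same return value (both A and B also mutate `visited` identically in Python — the
-- equivalence proved here is about the return value).

-- ===== PORT A =====
-- A is recursive and mutates `visited`; the port threads `visited` through an Option
-- (none = the Python raises: IndexError on a bad index, KeyError on a missing key).
-- The fuel argument only makes the recursion total; `visited.length + 1` is always enough
-- (each recursive call of A marks a previously-False entry True).
mutual
def dfsA (f : Nat) (G : List (Int × List Int)) (v : Int) (vis : List Bool) :
    Option (Bool × List Bool) :=
  match f with
  | 0 => none
  | g + 1 =>
    -- visited[v-1] = True
    match PySem.List.pySet? vis (v - 1) true with
    | none => none
    | some vis' =>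
      -- E = G[v]
      match G.lookup v with
      | none => none
      | some E => loopA g G E vis'
termination_by (f, 0)

-- the 'for ve in E' loop of A
def loopA (f : Nat) (G : List (Int × List Int)) (E : List Int) (vis : List Bool) :
    Option (Bool × List Bool) :=
  match E with
  | [] => some (false, vis)
  | ve :: rest =>
    match PySem.List.pyGet? vis (ve - 1) with
    | none => none
    | some b =>
      if b then some (true, vis)          -- else-branch: return True
      else
        match dfsA f G ve vis with        -- a = dfs(G, ve, visited)
        | none => none
        | some (a, w) => if a then some (true, w) else loopA f G rest w
termination_by (f, E.length + 1)
end

def dfs (G : List (Int × List Int)) (v : Int) (visited : List Bool) : Bool :=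
  ((dfsA (visited.length + 1) G v visited).map (·.1)).getD false

-- ===== PORT B =====
-- B's while loop over the explicit stack of remaining-neighbor lists; same fuel remark.
def runB (f : Nat) (G : List (Int × List Int)) (st : List (List Int)) (vis : List Bool) :
    Option Bool :=
  match st with
  | [] => some false                       -- while stack: exhausted
  | E :: stRest =>
    match E with
    | [] => runB f G stRest vis            -- if not E: stack.pop(); continue
    | ve :: rest =>
      match PySem.List.pyGet? vis (ve - 1) with
      | none => none
      | some b =>
        if b then some true                -- if visited[ve-1]: return True
        else
          match f with
          | 0 => none
          | g + 1 =>
            match PySem.List.pySet? vis (ve - 1) true with   -- visited[ve-1] = True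
            | none => none
            | some vis' =>
              match G.lookup ve with                          -- stack.append(G[ve])
              | none => none
              | some E' => runB g G (E' :: rest :: stRest) vis'
termination_by (f, st.length + (st.map List.length).sum)

def dfs_alt (G : List (Int × List Int)) (v : Int) (visited : List Bool) : Bool :=
  (match PySem.List.pySet? visited (v - 1) true with   -- visited[v-1] = True
   | none => none
   | some vis' =>
     match G.lookup v with                             -- stack = [G[v]]
     | none => none
     | some E => runB (visited.length + 1) G [E] vis').getD false

-- ===== PRECONDITION & SPEC =====
-- Pre_ excludes the raises at the entry node: IndexError on visited[v-1] and KeyError on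
-- G[v] (every input on which A returns satisfies it, so nothing A returns on is excluded).
-- A can also raise deeper in the traversal; that set has no closed-form description, and on
-- those inputs both ports map the raise point to the same value, so the theorem (whose proof
-- does not depend on Pre_) covers them as well.
def Pre_dfs (G : List (Int × List Int)) (v : Int) (visited : List Bool) : Prop :=
  PySem.Raise.InRange visited.length (v - 1) ∧ (G.lookup v).isSome = true
instance (G : List (Int × List Int)) (v : Int) (visited : List Bool) :
    Decidable (Pre_dfs G v visited) := by unfold Pre_dfs; infer_instance

def pvWitness_dfs : (List (Int × List Int)) × Int × List Bool :=
  ([(1, [2]), (2, [])], 1, [false, false])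

def Spec_dfs (G : List (Int × List Int)) (v : Int) (visited : List Bool) (out : Bool) : Prop :=
  out = dfs_alt G v visited
instance (G : List (Int × List Int)) (v : Int) (visited : List Bool) (out : Bool) :
    Decidable (Spec_dfs G v visited out) := by unfold Spec_dfs; infer_instance

-- ===== CLAIM (what is proved, stated in full; the proofs are below) =====
def Claim_equal_dfs : Prop := ∀ (G : List (Int × List Int)) (v : Int) (visited : List Bool), Dom_dfs G v visited → Pre_dfs G v visited → Spec_dfs G v visited (dfs G v visited)

-- ===== LEMMAS AND PROOFS =====

-- step equations for the two machines (unfold one step under a known guard)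
theorem dfsA_succ (g : Nat) (G : List (Int × List Int)) (v : Int) (vis : List Bool) :
    dfsA (g + 1) G v vis =
      (match PySem.List.pySet? vis (v - 1) true with
       | none => none
       | some vis' =>
         match G.lookup v with
         | none => none
         | some E => loopA g G E vis') := by
  rw [dfsA]

theorem loopA_guard_none (f : Nat) (G : List (Int × List Int)) (ve : Int) (rest : List Int)
    (vis : List Bool) (hgv : PySem.List.pyGet? vis (ve - 1) = none) :
    loopA f G (ve :: rest) vis = none := by
  rw [loopA]; simp [hgv]

theorem loopA_guard_true (f : Nat) (G : List (Int × List Int)) (ve : Int) (rest : List Int)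
    (vis : List Bool) (hgv : PySem.List.pyGet? vis (ve - 1) = some true) :
    loopA f G (ve :: rest) vis = some (true, vis) := by
  rw [loopA]; simp [hgv]

theorem loopA_guard_false (f : Nat) (G : List (Int × List Int)) (ve : Int) (rest : List Int)
    (vis : List Bool) (hgv : PySem.List.pyGet? vis (ve - 1) = some false) :
    loopA f G (ve :: rest) vis =
      (match dfsA f G ve vis with
       | none => none
       | some (a, w) => if a then some (true, w) else loopA f G rest w) := by
  rw [loopA]; simp [hgv]

theorem runB_nil (f : Nat) (G : List (Int × List Int)) (vis : List Bool) :
    runB f G [] vis = some false := by rw [runB.eq_def]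

theorem runB_pop (f : Nat) (G : List (Int × List Int)) (st : List (List Int)) (vis : List Bool) :
    runB f G ([] :: st) vis = runB f G st vis := by rw [runB.eq_def]

theorem runB_guard_none (f : Nat) (G : List (Int × List Int)) (ve : Int) (rest : List Int)
    (st : List (List Int)) (vis : List Bool) (hgv : PySem.List.pyGet? vis (ve - 1) = none) :
    runB f G ((ve :: rest) :: st) vis = none := by
  rw [runB.eq_def]; simp [hgv]

theorem runB_guard_true (f : Nat) (G : List (Int × List Int)) (ve : Int) (rest : List Int)
    (st : List (List Int)) (vis : List Bool) (hgv : PySem.List.pyGet? vis (ve - 1) = some true) :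
    runB f G ((ve :: rest) :: st) vis = some true := by
  rw [runB.eq_def]; simp [hgv]

theorem runB_guard_false (g : Nat) (G : List (Int × List Int)) (ve : Int) (rest : List Int)
    (st : List (List Int)) (vis : List Bool) (hgv : PySem.List.pyGet? vis (ve - 1) = some false) :
    runB (g + 1) G ((ve :: rest) :: st) vis =
      (match PySem.List.pySet? vis (ve - 1) true with
       | none => none
       | some vis' =>
         match G.lookup ve with
         | none => none
         | some E' => runB g G (E' :: rest :: st) vis') := by
  rw [runB.eq_def]; simp [hgv]

-- marking a False entry: the set succeeds, shrinks the False-count by one, keeps the length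
theorem mark_of_get_false (vis : List Bool) (i : Int)
    (h : PySem.List.pyGet? vis i = some false) :
    ∃ w, PySem.List.pySet? vis i true = some w ∧
      w.count false + 1 = vis.count false ∧ w.length = vis.length := by
  simp only [PySem.List.pyGet?, Option.bind_eq_some_iff] at h
  obtain ⟨k, hk, hget⟩ := h
  refine ⟨vis.set k true, ?_, ?_, by simp⟩
  · simp [PySem.List.pySet?, hk]
  · have hklt : k < vis.length := by
      by_contra hge
      simp [List.getElem?_eq_none (by omega : vis.length ≤ k)] at hget
    clear hk
    induction vis generalizing k with
    | nil => simp at hklt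
    | cons x xs ih =>
      cases k with
      | zero => simp_all
      | succ k' =>
        simp only [List.getElem?_cons_succ] at hget
        have := ih k' hget (by simpa using hklt)
        cases x <;> simp <;> omega

-- a successful set with value True leaves strictly fewer False entries than the length
theorem countFalse_lt_of_set_true (vis w : List Bool) (i : Int)
    (h : PySem.List.pySet? vis i true = some w) :
    w.count false < vis.length ∧ w.length = vis.length := by
  simp only [PySem.List.pySet?, Option.map_eq_some_iff] at h
  obtain ⟨k, hk, rfl⟩ := h
  have hklt : k < vis.length := by
    simp only [PySem.List.pyIdx?] at hk
    split_ifs at hk <;> simp_all <;> omega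
  refine ⟨?_, by simp⟩
  clear hk
  induction vis generalizing k with
  | nil => simp at hklt
  | cons x xs ih =>
    cases k with
    | zero =>
      have := List.count_le_length (l := xs) (a := false)
      simp_all
    | succ k' =>
      have := ih k' (by simpa using hklt)
      cases x <;> simp <;> omega

-- a successful set with True never increases the False-count
theorem countFalse_set_true_le (vis w : List Bool) (i : Int)
    (h : PySem.List.pySet? vis i true = some w) :
    w.count false ≤ vis.count false := by
  simp only [PySem.List.pySet?, Option.map_eq_some_iff] at h
  obtain ⟨k, hk, rfl⟩ := h
  clear hk
  induction vis generalizing k with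
  | nil => simp
  | cons x xs ih =>
    cases k with
    | zero => cases x <;> simp
    | succ k' => have := ih k'; cases x <;> simp <;> omega

-- the traversal never increases the number of False entries (A's side)
theorem countFalse_mono (f : Nat) :
    (∀ (G : List (Int × List Int)) (v : Int) (vis : List Bool) a w,
        dfsA f G v vis = some (a, w) → w.count false ≤ vis.count false) ∧
    (∀ (G : List (Int × List Int)) (E : List Int) (vis : List Bool) a w,
        loopA f G E vis = some (a, w) → w.count false ≤ vis.count false) := by
  induction f using Nat.strong_induction_on with
  | _ f IH =>
    have hdfs : ∀ (G : List (Int × List Int)) (v : Int) (vis : List Bool) a w,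
        dfsA f G v vis = some (a, w) → w.count false ≤ vis.count false := by
      intro G v vis a w h
      match f with
      | 0 => rw [dfsA] at h; exact absurd h (by simp)
      | g + 1 =>
        rw [dfsA_succ] at h
        cases hs : PySem.List.pySet? vis (v - 1) true with
        | none => simp [hs] at h
        | some vis' =>
          cases hl : G.lookup v with
          | none => simp [hs, hl] at h
          | some E =>
            simp only [hs, hl] at h
            exact le_trans ((IH g (by omega)).2 G E vis' a w h)
              (countFalse_set_true_le vis vis' (v - 1) hs)
    refine ⟨hdfs, ?_⟩
    intro G E
    induction E with
    | nil => intro vis a w h; rw [loopA] at h; simp_all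
    | cons ve rest ihE =>
      intro vis a w h
      cases hgv : PySem.List.pyGet? vis (ve - 1) with
      | none => rw [loopA_guard_none f G ve rest vis hgv] at h; exact absurd h (by simp)
      | some b =>
        cases b with
        | true =>
          rw [loopA_guard_true f G ve rest vis hgv] at h
          simp_all
        | false =>
          rw [loopA_guard_false f G ve rest vis hgv] at h
          cases hd : dfsA f G ve vis with
          | none => simp [hd] at h
          | some p =>
            obtain ⟨a1, w1⟩ := p
            have h1 := hdfs G ve vis a1 w1 hd
            simp only [hd] at h
            cases a1 with
            | true => simp_all
            | false =>
              simp only [Bool.false_eq_true, if_false] at h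
              exact le_trans (ihE w1 a w h) h1

-- fuel irrelevance for A's loop: any fuel above the False-count gives the same result
theorem loopA_fuel_irrel (f : Nat) :
    ∀ (g : Nat) (G : List (Int × List Int)) (E : List Int) (vis : List Bool),
      vis.count false < f → vis.count false < g → loopA f G E vis = loopA g G E vis := by
  induction f using Nat.strong_induction_on with
  | _ f IH =>
    intro g G E
    induction E with
    | nil => intro vis _ _; rw [loopA, loopA]
    | cons ve rest ihE =>
      intro vis hf hg
      cases hgv : PySem.List.pyGet? vis (ve - 1) with
      | none => rw [loopA_guard_none f G ve rest vis hgv, loopA_guard_none g G ve rest vis hgv]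
      | some b =>
        cases b with
        | true => rw [loopA_guard_true f G ve rest vis hgv, loopA_guard_true g G ve rest vis hgv]
        | false =>
          rw [loopA_guard_false f G ve rest vis hgv, loopA_guard_false g G ve rest vis hgv]
          have hmem : false ∈ vis := PySem.List.mem_of_pyGet?_eq_some vis hgv
          have hpos : 0 < vis.count false := List.count_pos_iff.mpr hmem
          obtain ⟨f', rfl⟩ : ∃ f', f = f' + 1 := ⟨f - 1, by omega⟩
          obtain ⟨g', rfl⟩ : ∃ g', g = g' + 1 := ⟨g - 1, by omega⟩
          obtain ⟨vis', hset, hcnt, _⟩ := mark_of_get_false vis (ve - 1) hgv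
          rw [dfsA_succ, dfsA_succ]
          simp only [hset]
          cases hl : G.lookup ve with
          | none => simp
          | some E' =>
            simp only
            have hchild : loopA f' G E' vis' = loopA g' G E' vis' :=
              IH f' (by omega) g' G E' vis' (by omega) (by omega)
            rw [hchild]
            cases hres : loopA g' G E' vis' with
            | none => simp
            | some p =>
              obtain ⟨a, w⟩ := p
              have hw : w.count false ≤ vis'.count false :=
                (countFalse_mono g').2 G E' vis' a w hres
              cases a with
              | true => simp
              | false =>
                simp only [Bool.false_eq_true, if_false]
                exact ihE w (by omega) (by omega)

-- fuel irrelevance for B's stack machine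
theorem runB_fuel_irrel (f : Nat) :
    ∀ (g : Nat) (G : List (Int × List Int)) (st : List (List Int)) (vis : List Bool),
      vis.count false < f → vis.count false < g → runB f G st vis = runB g G st vis := by
  induction f using Nat.strong_induction_on with
  | _ f IH =>
    intro g G st
    induction st with
    | nil => intro vis _ _; rw [runB_nil, runB_nil]
    | cons E stRest ihSt =>
      intro vis hf hg
      cases E with
      | nil => rw [runB_pop, runB_pop]; exact ihSt vis hf hg
      | cons ve rest =>
        cases hgv : PySem.List.pyGet? vis (ve - 1) with
        | none => rw [runB_guard_none f G ve rest stRest vis hgv,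
                      runB_guard_none g G ve rest stRest vis hgv]
        | some b =>
          cases b with
          | true => rw [runB_guard_true f G ve rest stRest vis hgv,
                        runB_guard_true g G ve rest stRest vis hgv]
          | false =>
            have hmem : false ∈ vis := PySem.List.mem_of_pyGet?_eq_some vis hgv
            have hpos : 0 < vis.count false := List.count_pos_iff.mpr hmem
            obtain ⟨f', rfl⟩ : ∃ f', f = f' + 1 := ⟨f - 1, by omega⟩
            obtain ⟨g', rfl⟩ : ∃ g', g = g' + 1 := ⟨g - 1, by omega⟩
            rw [runB_guard_false f' G ve rest stRest vis hgv,
                runB_guard_false g' G ve rest stRest vis hgv]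
            obtain ⟨vis', hset, hcnt, _⟩ := mark_of_get_false vis (ve - 1) hgv
            simp only [hset]
            cases hl : G.lookup ve with
            | none => simp
            | some E' =>
              exact IH f' (by omega) g' G (E' :: rest :: stRest) vis' (by omega) (by omega)

-- the simulation: B's stack machine runs A's loop on the top frame, then the rest of the stack
theorem runB_sim (f : Nat) :
    ∀ (G : List (Int × List Int)) (E : List Int) (st : List (List Int)) (vis : List Bool),
      vis.count false < f →
      runB f G (E :: st) vis =
        (match loopA f G E vis with
         | none => none
         | some (true, _) => some true
         | some (false, w) => runB f G st w) := by
  induction f using Nat.strong_induction_on with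
  | _ f IH =>
    intro G E st vis hf
    cases E with
    | nil => rw [runB_pop, loopA]
    | cons ve rest =>
      cases hgv : PySem.List.pyGet? vis (ve - 1) with
      | none => rw [runB_guard_none f G ve rest st vis hgv, loopA_guard_none f G ve rest vis hgv]
      | some b =>
        cases b with
        | true => rw [runB_guard_true f G ve rest st vis hgv, loopA_guard_true f G ve rest vis hgv]
        | false =>
          have hmem : false ∈ vis := PySem.List.mem_of_pyGet?_eq_some vis hgv
          have hpos : 0 < vis.count false := List.count_pos_iff.mpr hmem
          obtain ⟨g, rfl⟩ : ∃ g, f = g + 1 := ⟨f - 1, by omega⟩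
          obtain ⟨vis', hset, hcnt, _⟩ := mark_of_get_false vis (ve - 1) hgv
          rw [runB_guard_false g G ve rest st vis hgv, loopA_guard_false (g + 1) G ve rest vis hgv,
              dfsA_succ]
          simp only [hset]
          cases hl : G.lookup ve with
          | none => simp
          | some E' =>
            simp only
            have h1 : runB g G (E' :: rest :: st) vis' =
                (match loopA g G E' vis' with
                 | none => none
                 | some (true, _) => some true
                 | some (false, w) => runB g G (rest :: st) w) :=
              IH g (by omega) G E' (rest :: st) vis' (by omega)
            rw [h1]
            cases hres : loopA g G E' vis' with
            | none => simp
            | some p =>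
              obtain ⟨a, w⟩ := p
              cases a with
              | true => simp
              | false =>
                simp only [Bool.false_eq_true, if_false]
                have hw : w.count false ≤ vis'.count false :=
                  (countFalse_mono g).2 G E' vis' false w hres
                have h2 : runB g G (rest :: st) w =
                    (match loopA g G rest w with
                     | none => none
                     | some (true, _) => some true
                     | some (false, w2) => runB g G st w2) :=
                  IH g (by omega) G rest st w (by omega)
                rw [h2, loopA_fuel_irrel g (g + 1) G rest w (by omega) (by omega)]
                cases hres2 : loopA (g + 1) G rest w with
                | none => simp
                | some p2 =>
                  obtain ⟨a2, w2⟩ := p2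
                  cases a2 with
                  | true => simp
                  | false =>
                    simp only
                    have hw2 : w2.count false ≤ w.count false := by
                      have := (countFalse_mono (g + 1)).2 G rest w false w2 hres2
                      omega
                    exact runB_fuel_irrel g (g + 1) G st w2 (by omega) (by omega)

-- ===== VERDICT (by name: the statement is the Claim_ definition above) =====
theorem dfs_spec : Claim_equal_dfs := by
  intro G v visited _hdom _hpre
  show dfs G v visited = dfs_alt G v visited
  unfold dfs dfs_alt
  rw [dfsA_succ]
  cases hs : PySem.List.pySet? visited (v - 1) true with
  | none => simp
  | some vis' =>
    cases hl : G.lookup v with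
    | none => simp
    | some E =>
      simp only
      obtain ⟨hlt, hlen⟩ := countFalse_lt_of_set_true visited vis' (v - 1) hs
      rw [runB_sim (visited.length + 1) G E [] vis' (by omega),
          loopA_fuel_irrel (visited.length + 1) visited.length G E vis' (by omega) (by omega)]
      cases hres : loopA visited.length G E vis' with
      | none => simp
      | some p =>
        obtain ⟨a, w⟩ := p
        cases a <;> simp [runB_nil]
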